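-- pv_equiv track=rewrite | github.com/arianerh/OL-to-SR | tools.py | count_inverse
-- ===== SOURCE A (Python) =====
-- import copy
--
-- def is_before(X,Y,order) :
-- 	is_x = False
-- 	is_y = False
-- 	for eq in order :
-- 		for i in eq :
-- 			if i == X :
-- 				is_x=True
-- 			if i == Y :
-- 				is_y=True
-- 		if is_x :
-- 			# if both were present in the same equivalence class, they are equivalent
-- 			if is_y :
-- 				return -1
-- 			return True
-- 		if is_y :
-- 			return False
--
-- def count_inverse(prefs,og) :
-- 	p2 = copy.deepcopy(prefs)
-- 	dist = 0
-- 	while p2 :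
-- 		# in case of an equivalence, it cannot lead to a contradiction: we simply remove it
-- 		if p2[0][::-1] in p2 :
-- 			p2 = [x for x in p2 if x != p2[0] and x != p2[0][::-1]]
-- 		# if there is no equivalence
-- 		else :
-- 			corr = is_before(p2[0][0], p2[0][1], og)
-- 			# if order is reversed in og, we increase the distance
-- 			if not corr :
-- 				dist += 1
-- 			p2.remove(p2[0])
-- 	return dist
-- ===== SOURCE B (Python) =====
-- def count_inverse(prefs, og):
--     # first class index for each element of og
--     pos = {}
--     for idx, eq in enumerate(og):
--         for v in eq:
--             if v not in pos:
--                 pos[v] = idx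
--     present = set(map(tuple, prefs))
--     dist = 0
--     for p in prefs:
--         if tuple(reversed(p)) in present:
--             continue
--         px = pos.get(p[0])
--         py = pos.get(p[1])
--         if px is None or (py is not None and py < px):
--             dist += 1
--     return dist
-- ===== Notes on version B (the rewrite author's own statement) =====
-- stated objective: faster
-- what changed: Replaced the quadratic remove-from-a-deep-copy loop (each step scans p2 for the reversed pair and rescans og per element) by one precomputed element->first-class-index dict plus a set of pairs, so the count is a single pass with O(1) lookups.
import Mathlib
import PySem

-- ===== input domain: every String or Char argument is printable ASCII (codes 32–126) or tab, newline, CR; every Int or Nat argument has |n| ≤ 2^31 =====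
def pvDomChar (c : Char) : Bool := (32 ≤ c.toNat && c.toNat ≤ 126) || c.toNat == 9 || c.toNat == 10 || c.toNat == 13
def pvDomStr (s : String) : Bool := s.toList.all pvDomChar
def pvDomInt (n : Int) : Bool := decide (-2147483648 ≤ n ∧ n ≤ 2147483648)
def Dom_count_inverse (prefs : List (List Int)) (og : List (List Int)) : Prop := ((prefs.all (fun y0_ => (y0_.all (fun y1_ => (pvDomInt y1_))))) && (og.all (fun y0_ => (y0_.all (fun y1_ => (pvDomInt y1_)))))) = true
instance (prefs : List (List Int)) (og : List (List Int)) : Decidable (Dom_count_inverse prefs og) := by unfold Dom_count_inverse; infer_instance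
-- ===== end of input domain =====

-- B replaces A's quadratic remove-from-a-copy loop by a precomputed element->first-class-index
-- dict and a set of pairs, giving one linear pass (objective: faster).

-- ===== PORT A =====
-- is_before returns one of True / False / -1 / None; encoded as some 1 / some 0 / some (-1) / none.
def isBeforeLoop (X Y : Int) (order : List (List Int)) (is_x is_y : Bool) : Option Int :=
  match order with
  | [] => none
  | eq :: rest =>
    let s := eq.foldl (fun (st : Bool × Bool) i =>
      ((if i = X then true else st.1), (if i = Y then true else st.2))) (is_x, is_y)
    if s.1 then (if s.2 then some (-1) else some 1)
    else if s.2 then some 0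
    else isBeforeLoop X Y rest s.1 s.2

def is_before (X Y : Int) (order : List (List Int)) : Option Int :=
  isBeforeLoop X Y order false false

-- the while loop of count_inverse; p2.remove(p2[0]) removes the first occurrence, i.e. the head
def countLoop (og : List (List Int)) (p2 : List (List Int)) (dist : Int) : Int :=
  match p2 with
  | [] => dist
  | hd :: tl =>
    if hd.reverse ∈ hd :: tl then
      countLoop og ((hd :: tl).filter (fun x => decide (x ≠ hd ∧ x ≠ hd.reverse))) dist
    else
      let dist' :=
        match hd with
        | a :: b :: _ =>
          let corr := is_before a b og
          if corr = none ∨ corr = some 0 then dist + 1 else dist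
        | _ => dist  -- unreachable: hd.reverse ∉ p2 forces hd.length ≥ 2 (a short hd is a palindrome)
      countLoop og tl dist'
termination_by p2.length
decreasing_by
  · simp only [List.unattach_reverse, List.unattach_attach, List.filter_cons, ne_eq,
      not_true_eq_false, false_and, decide_false, Bool.false_eq_true, if_false, List.length_cons]
    have := List.length_filter_le (fun x => decide (¬x = hd ∧ ¬x = hd.reverse)) tl
    omega
  · simp

def count_inverse (prefs : List (List Int)) (og : List (List Int)) : Int :=
  countLoop og prefs 0

-- ===== PORT B =====
def buildPos (og : List (List Int)) : PySem.Dict Int Int :=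
  (PySem.List.enumerate og).foldl
    (fun d p => p.2.foldl (fun d v => if d.contains v then d else d.insert v p.1) d)
    PySem.Dict.empty

def count_inverse_alt (prefs : List (List Int)) (og : List (List Int)) : Int :=
  let pos := buildPos og
  let present := PySem.Set.ofList prefs
  prefs.foldl
    (fun dist p =>
      if p.reverse ∈ present then dist
      else
        let px := pos.get? (p.headI)
        let py := pos.get? (p.getD 1 0)
        if px = none ∨ (py ≠ none ∧ py.getD 0 < px.getD 0) then dist + 1 else dist)
    0

-- ===== PRECONDITION & SPEC =====
def Spec_count_inverse (prefs : List (List Int)) (og : List (List Int)) (out : Int) : Prop := out = count_inverse_alt prefs og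
instance (prefs : List (List Int)) (og : List (List Int)) (out : Int) : Decidable (Spec_count_inverse prefs og out) := by unfold Spec_count_inverse; infer_instance

-- ===== CLAIM (what is proved, stated in full; the proofs are below) =====
def Claim_equal_count_inverse : Prop := ∀ (prefs : List (List Int)) (og : List (List Int)), Dom_count_inverse prefs og → Spec_count_inverse prefs og (count_inverse prefs og)

-- ===== LEMMAS AND PROOFS =====

-- index of the first og class containing v
def fidx (v : Int) (og : List (List Int)) : Option Nat :=
  og.findIdx? (fun eq => decide (v ∈ eq))

-- the counting condition of both programs, phrased through fidx
def badB (a b : Int) (og : List (List Int)) : Bool :=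
  match fidx a og, fidx b og with
  | none, _ => true
  | some _, none => false
  | some i, some j => decide (j < i)

def badP (og : List (List Int)) (x : List Int) : Bool :=
  badB x.headI (x.getD 1 0) og

lemma flags_foldl (X Y : Int) (eq : List Int) (x y : Bool) :
    eq.foldl (fun (st : Bool × Bool) i =>
      ((if i = X then true else st.1), (if i = Y then true else st.2))) (x, y)
      = (x || decide (X ∈ eq), y || decide (Y ∈ eq)) := by
  induction eq generalizing x y with
  | nil => simp
  | cons h t ih =>
    simp only [List.foldl_cons, ih, List.mem_cons]
    by_cases h1 : h = X <;> by_cases h2 : h = Y <;>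
      simp [h1, h2, eq_comm (a := X) (b := h), eq_comm (a := Y) (b := h),
        decide_eq_decide.mpr (eq_comm (a := X) (b := Y)),
        Bool.or_assoc, Bool.or_comm]

lemma is_before_eq (a b : Int) (og : List (List Int)) :
    is_before a b og =
      match fidx a og, fidx b og with
      | none, none => none
      | some _, none => some 1
      | none, some _ => some 0
      | some i, some j => if i < j then some 1 else if j < i then some 0 else some (-1) := by
  induction og with
  | nil => simp [is_before, isBeforeLoop, fidx]
  | cons eq rest ih =>
    simp only [is_before] at ih ⊢
    rw [isBeforeLoop]
    simp only [flags_foldl, Bool.false_or, fidx, List.findIdx?_cons]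
    simp only [fidx] at ih
    by_cases ha : a ∈ eq <;> by_cases hb : b ∈ eq
    · simp [ha, hb]
    · rcases h2 : rest.findIdx? (fun eq => decide (b ∈ eq)) with _ | j <;> simp [ha, hb]
    · rcases h1 : rest.findIdx? (fun eq => decide (a ∈ eq)) with _ | i <;> simp [ha, hb]
    · rw [show (decide (a ∈ eq)) = false by simp [ha], show (decide (b ∈ eq)) = false by simp [hb]]
      simp only [Bool.false_eq_true, if_false, ih]
      rcases h1 : rest.findIdx? (fun eq => decide (a ∈ eq)) with _ | i <;>
        rcases h2 : rest.findIdx? (fun eq => decide (b ∈ eq)) with _ | j <;> simp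

lemma not_corr_iff (a b : Int) (og : List (List Int)) :
    ((is_before a b og = none ∨ is_before a b og = some 0)) ↔ badB a b og = true := by
  rw [is_before_eq]; unfold badB
  rcases fidx a og with _ | i <;> rcases fidx b og with _ | j <;> simp
  split_ifs with h1 h2 <;> simp <;> omega

lemma inner_get? (k : Int) (eq : List Int) (d : PySem.Dict Int Int) (v : Int) :
    (eq.foldl (fun d v' => if d.contains v' then d else d.insert v' k) d).get? v
      = match d.get? v with
        | some x => some x
        | none => if v ∈ eq then some k else none := by
  induction eq generalizing d with
  | nil => rcases hd : d.get? v with _ | x <;> simp [hd]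
  | cons w t ih =>
    simp only [List.foldl_cons]
    by_cases hc : d.contains w
    · rw [if_pos hc, ih]
      rcases hd : d.get? v with _ | x
      · have hvw : v ≠ w := by
          intro h; subst h
          rw [PySem.Dict.contains_eq_isSome_get?, hd] at hc; simp at hc
        simp [List.mem_cons, hvw]
      · simp
    · rw [if_neg hc, ih]
      by_cases hvw : v = w
      · subst hvw
        rw [PySem.Dict.get?_insert_self]
        rcases hd : d.get? v with _ | x
        · simp
        · rw [PySem.Dict.contains_eq_isSome_get?, hd] at hc; simp at hc
      · rw [PySem.Dict.get?_insert_of_ne _ _ hvw]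
        rcases hd : d.get? v with _ | x <;> simp [List.mem_cons, hvw]

lemma enum_get? (og : List (List Int)) (s : Int) (d : PySem.Dict Int Int) (v : Int) :
    ((PySem.List.enumerate og s).foldl
        (fun d p => p.2.foldl (fun d v' => if d.contains v' then d else d.insert v' p.1) d)
        d).get? v
      = match d.get? v with
        | some x => some x
        | none => (fidx v og).map (fun n => s + (n : Int)) := by
  induction og generalizing s d with
  | nil => rcases hd : d.get? v with _ | x <;> simp [fidx, hd]
  | cons eq rest ih =>
    rw [PySem.List.enumerate_cons]
    simp only [List.foldl_cons]
    rw [ih, inner_get?]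
    rcases hd : d.get? v with _ | x
    · by_cases hv : v ∈ eq
      · simp [fidx, List.findIdx?_cons, hv]
      · simp only [hv, if_false, fidx, List.findIdx?_cons, decide_false, Bool.false_eq_true]
        rcases hrest : rest.findIdx? (fun eq => decide (v ∈ eq)) with _ | n <;>
          simp; omega
    · simp

lemma buildPos_get? (og : List (List Int)) (v : Int) :
    (buildPos og).get? v = (fidx v og).map (fun n => (n : Int)) := by
  unfold buildPos
  rw [enum_get?]
  rcases h : fidx v og with _ | n <;> simp [PySem.Dict.empty, PySem.Dict.get?, h]

lemma alt_body_eq (prefs og : List (List Int)) :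
    (fun (dist : Int) (p : List Int) =>
      if p.reverse ∈ PySem.Set.ofList prefs then dist
      else
        let px := (buildPos og).get? (p.headI)
        let py := (buildPos og).get? (p.getD 1 0)
        if px = none ∨ (py ≠ none ∧ py.getD 0 < px.getD 0) then dist + 1 else dist)
    = (fun (dist : Int) (p : List Int) =>
        if (decide (p.reverse ∉ prefs) && badP og p) = true then dist + 1 else dist) := by
  funext dist p
  by_cases hm : p.reverse ∈ prefs
  · simp [PySem.Set.mem_ofList, hm]
  · simp only [(PySem.Set.mem_ofList prefs p.reverse).symm] at hm
    simp only [PySem.Set.mem_ofList] at hm ⊢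
    rw [if_neg hm]
    simp only [hm, not_false_eq_true, decide_true, Bool.true_and, buildPos_get?, badP, badB]
    rcases h1 : fidx p.headI og with _ | i <;> rcases h2 : fidx (p.getD 1 0) og with _ | j <;>
      simp

lemma alt_eq_countP (prefs og : List (List Int)) :
    count_inverse_alt prefs og
      = ((prefs.countP (fun x => decide (x.reverse ∉ prefs) && badP og x) : Nat) : Int) := by
  show List.foldl _ 0 prefs = _
  rw [alt_body_eq prefs og, PySem.List.foldl_count_if]
  simp

lemma countLoop_eq (og : List (List Int)) :
    ∀ (n : Nat) (p2 : List (List Int)), p2.length ≤ n → ∀ (dist : Int),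
      countLoop og p2 dist
        = dist + ((p2.countP (fun x => decide (x.reverse ∉ p2) && badP og x) : Nat) : Int) := by
  intro n
  induction n with
  | zero =>
    intro p2 hlen dist
    have : p2 = [] := List.length_eq_zero_iff.mp (Nat.le_zero.mp hlen)
    subst this
    simp [countLoop]
  | succ m ih =>
    intro p2 hlen dist
    match p2 with
    | [] => simp [countLoop]
    | hd :: tl =>
      rw [countLoop.eq_def]
      simp only
      by_cases hmem : hd.reverse ∈ hd :: tl
      · rw [if_pos hmem]
        set q : List Int → Bool := fun x => decide (x ≠ hd ∧ x ≠ hd.reverse) with hq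
        have hqhd : q hd = false := by simp [hq]
        have hlen3 : ((hd :: tl).filter q).length ≤ m := by
          rw [List.filter_cons, hqhd]
          · simp only [Bool.false_eq_true, if_false]
            have := List.length_filter_le q tl
            simp only [List.length_cons] at hlen
            omega
        rw [ih _ hlen3]
        congr 2
        -- counting over the filtered list with its own reverse-membership equals counting over p2
        rw [List.countP_filter, List.countP_congr]
        intro x hx
        by_cases hqx : q x = true
        · simp only [hqx, Bool.and_true]
          have hx1 : x ≠ hd ∧ x ≠ hd.reverse := by simpa [hq] using hqx
          have hqr : q x.reverse = true := by
            simp only [hq, decide_eq_true_eq, ne_eq]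
            constructor
            · intro h; apply hx1.2; rw [← h, List.reverse_reverse]
            · intro h; apply hx1.1
              have := congrArg List.reverse h
              simpa using this
          have : (x.reverse ∈ List.filter q (hd :: tl)) ↔ x.reverse ∈ hd :: tl := by
            rw [List.mem_filter]
            exact ⟨fun h => h.1, fun h => ⟨h, hqr⟩⟩
          by_cases hrm : x.reverse ∈ hd :: tl
          · simp [hrm, this.mpr hrm]
          · simp [hrm]
        · have hx1 : x = hd ∨ x = hd.reverse := by
            by_contra hcon
            push Not at hcon
            exact hqx (by simp [hq, hcon.1, hcon.2])
          have hrm : x.reverse ∈ hd :: tl := by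
            rcases hx1 with h | h <;> subst h
            · exact hmem
            · simp
          simp [hqx, hrm]
      · rw [if_neg hmem]
        -- hd has at least two elements: a shorter list is its own reverse, hence in p2
        rcases hd with _ | ⟨a, _ | ⟨b, t⟩⟩
        · exact absurd (by simp) hmem
        · exact absurd (by simp) hmem
        · show countLoop og tl
              (if is_before a b og = none ∨ is_before a b og = some 0 then dist + 1 else dist) = _
          have hlen2 : tl.length ≤ m := by simp only [List.length_cons] at hlen; omega
          rw [ih _ hlen2]
          have hbad : (if is_before a b og = none ∨ is_before a b og = some 0
              then dist + 1 else dist) = (if badP og (a :: b :: t) = true then dist + 1 else dist) := by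
            rcases hc : badP og (a :: b :: t) with _ | _
            · rw [if_neg, if_neg] <;> simp_all [not_corr_iff a b og, badP]
            · rw [if_pos, if_pos]
              · rfl
              · exact (not_corr_iff a b og).mpr (by simpa [badP] using hc)
          rw [hbad]
          have hcnt : tl.countP (fun x => decide (x.reverse ∉ tl) && badP og x)
              = tl.countP (fun x => decide (x.reverse ∉ (a :: b :: t) :: tl) && badP og x) := by
            apply List.countP_congr
            intro x hx
            have : (x.reverse ∈ (a :: b :: t) :: tl) ↔ x.reverse ∈ tl := by
              simp only [List.mem_cons]
              constructor
              · rintro (h | h)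
                · exfalso
                  apply hmem
                  have : x = (a :: b :: t).reverse := by
                    have := congrArg List.reverse h; simpa using this
                  rw [← this]
                  exact List.mem_cons_of_mem _ hx
                · exact h
              · exact fun h => Or.inr h
            by_cases hrm : x.reverse ∈ tl
            · simp [hrm, this.mpr hrm]
            · have hxne : ¬ x = t.reverse ++ [b, a] := by
                intro h
                exact hrm (this.mp (by rw [h]; simp))
              simp [hrm, hxne]
          rw [List.countP_cons, ← hcnt]
          have hm2 : ¬t.reverse ++ [b, a] = a :: b :: t ∧ t.reverse ++ [b, a] ∉ tl := by
            simpa [not_or] using hmem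
          rcases hb2 : badP og (a :: b :: t) with _ | _ <;>
            simp [hb2, hm2] <;> push_cast <;> ring

-- ===== VERDICT (by name: the statement is the Claim_ definition above) =====
theorem count_inverse_spec : Claim_equal_count_inverse := by
  intro prefs og _
  show count_inverse prefs og = count_inverse_alt prefs og
  rw [alt_eq_countP]
  show countLoop og prefs 0 = _
  rw [countLoop_eq og prefs.length prefs (le_refl _) 0]
  simp
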